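-- pv_equiv track=rewrite | github.com/codebegun-dev/lms | server/src/main/python/Voice_InterviewSystem.py | analyze_answer_quality
-- ===== SOURCE A (Python) =====
-- def analyze_answer_quality(question, answer):
--     """Analyze the quality of a single answer without keywords"""
--
--     if any(phrase in answer for phrase in ["no response", "could not understand", "error with speech", "microphone error"]):
--         return 0, len(answer.split())
--
--     word_count = len(answer.split())
--
--     # Quality score calculation based on answer structure and content
--     quality_score = 0
--
--     # Word count factor (0-4 points)
--     if word_count > 50:
--         quality_score += 4
--     elif word_count > 30:
--         quality_score += 3
--     elif word_count > 20:
--         quality_score += 2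
--     elif word_count > 10:
--         quality_score += 1
--
--     # Structure factor (0-3 points)
--     if any(phrase in answer for phrase in ['because', 'for example', 'such as', 'this means', 'in other words']):
--         quality_score += 3
--     elif any(phrase in answer for phrase in ['is when', 'used for', 'allows us', 'the purpose']):
--         quality_score += 2
--     elif any(phrase in answer for phrase in ['means that', 'allows to', 'helps to']):
--         quality_score += 1
--
--     # Technical depth factor (0-3 points)
--     technical_terms = sum(1 for term in ['function', 'method', 'class', 'object', 'variable', 'database', 'query',
--                                        'algorithm', 'interface', 'inheritance', 'polymorphism', 'encapsulation',
--                                        'decorator', 'generator', 'iterator', 'join', 'index', 'normalization']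
--                         if term in answer)
--     if technical_terms >= 3:
--         quality_score += 3
--     elif technical_terms >= 2:
--         quality_score += 2
--     elif technical_terms >= 1:
--         quality_score += 1
--
--     return min(quality_score, 10), word_count
-- ===== SOURCE B (Python) =====
-- ERROR_PHRASES = ["no response", "could not understand", "error with speech", "microphone error"]
--
-- STRUCTURE_HIGH = ['because', 'for example', 'such as', 'this means', 'in other words']
-- STRUCTURE_MID = ['is when', 'used for', 'allows us', 'the purpose']
-- STRUCTURE_LOW = ['means that', 'allows to', 'helps to']
--
-- TECH_TERMS = ['function', 'method', 'class', 'object', 'variable', 'database', 'query',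
--               'algorithm', 'interface', 'inheritance', 'polymorphism', 'encapsulation',
--               'decorator', 'generator', 'iterator', 'join', 'index', 'normalization']
--
--
-- def analyze_answer_quality(question, answer):
--     """Unified rule-table scorer: one pass over (category, points, hit) rules keeping the
--     per-category maximum in a dict, then sum the per-category maxima."""
--     word_count = len(answer.split())
--
--     if any(phrase in answer for phrase in ERROR_PHRASES):
--         return 0, word_count
--
--     technical_terms = sum(term in answer for term in TECH_TERMS)
--
--     rules = [
--         ('length', 4, word_count > 50),
--         ('length', 3, word_count > 30),
--         ('length', 2, word_count > 20),
--         ('length', 1, word_count > 10),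
--         ('structure', 3, any(p in answer for p in STRUCTURE_HIGH)),
--         ('structure', 2, any(p in answer for p in STRUCTURE_MID)),
--         ('structure', 1, any(p in answer for p in STRUCTURE_LOW)),
--         ('depth', 3, technical_terms >= 3),
--         ('depth', 2, technical_terms >= 2),
--         ('depth', 1, technical_terms >= 1),
--     ]
--
--     best = {}
--     for category, points, hit in rules:
--         if hit:
--             best[category] = max(best.get(category, 0), points)
--
--     return sum(best.values()), word_count
-- ===== Notes on version B (the rewrite author's own statement) =====
-- stated objective: alternative
-- what changed: Replaced A's three separate if/elif cascades by a single pass over a unified (category, points, hit) rule table that keeps the per-category maximum in a dict and sums the maxima, and dropped the redundant min(score, 10) cap (the maximum attainable score is exactly 10).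
import Mathlib
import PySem

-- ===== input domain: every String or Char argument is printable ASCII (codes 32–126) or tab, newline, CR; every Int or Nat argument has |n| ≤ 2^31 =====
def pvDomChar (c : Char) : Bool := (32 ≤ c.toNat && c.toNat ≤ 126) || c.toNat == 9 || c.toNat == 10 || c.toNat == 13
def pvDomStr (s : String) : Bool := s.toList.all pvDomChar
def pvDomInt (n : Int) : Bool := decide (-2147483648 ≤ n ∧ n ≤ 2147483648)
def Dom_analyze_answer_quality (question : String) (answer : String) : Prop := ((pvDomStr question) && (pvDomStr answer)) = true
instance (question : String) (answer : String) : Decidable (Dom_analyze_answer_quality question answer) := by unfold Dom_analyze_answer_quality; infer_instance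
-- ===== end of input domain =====

-- B replaces A's three separate if/elif cascades by ONE pass over a unified (category, points, hit)
-- rule table, keeping the per-category maximum in a dict and summing the maxima; the redundant
-- min(score, 10) cap is dropped (the maximum attainable score is exactly 10). Objective: alternative.

-- ===== PORT A =====
def analyze_answer_quality (question : String) (answer : String) : Int × Int :=
  if (["no response", "could not understand", "error with speech", "microphone error"].any
        (fun p => PySem.Str.isIn p answer)) then
    (0, ((PySem.Str.split₀ answer).length : Int))
  else
    let word_count : Int := ((PySem.Str.split₀ answer).length : Int)
    let quality_score : Int := 0
    let quality_score :=
      if word_count > 50 then quality_score + 4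
      else if word_count > 30 then quality_score + 3
      else if word_count > 20 then quality_score + 2
      else if word_count > 10 then quality_score + 1
      else quality_score
    let quality_score :=
      if (["because", "for example", "such as", "this means", "in other words"].any
            (fun p => PySem.Str.isIn p answer)) then quality_score + 3
      else if (["is when", "used for", "allows us", "the purpose"].any
            (fun p => PySem.Str.isIn p answer)) then quality_score + 2
      else if (["means that", "allows to", "helps to"].any
            (fun p => PySem.Str.isIn p answer)) then quality_score + 1
      else quality_score
    let technical_terms : Int :=
      ((["function", "method", "class", "object", "variable", "database", "query",
         "algorithm", "interface", "inheritance", "polymorphism", "encapsulation",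
         "decorator", "generator", "iterator", "join", "index", "normalization"].filter
          (fun t => PySem.Str.isIn t answer)).map (fun _ => (1 : Int))).sum
    let quality_score :=
      if technical_terms ≥ 3 then quality_score + 3
      else if technical_terms ≥ 2 then quality_score + 2
      else if technical_terms ≥ 1 then quality_score + 1
      else quality_score
    (min quality_score 10, word_count)

-- ===== PORT B =====
def pvErrorPhrases : List String := ["no response", "could not understand", "error with speech", "microphone error"]

def pvStructureHigh : List String := ["because", "for example", "such as", "this means", "in other words"]
def pvStructureMid : List String := ["is when", "used for", "allows us", "the purpose"]
def pvStructureLow : List String := ["means that", "allows to", "helps to"]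

def pvTechTerms : List String :=
  ["function", "method", "class", "object", "variable", "database", "query",
   "algorithm", "interface", "inheritance", "polymorphism", "encapsulation",
   "decorator", "generator", "iterator", "join", "index", "normalization"]

-- sum(term in answer for term in TECH_TERMS): a sum of bools-as-ints
def pvTechCount (answer : String) : Int :=
  (pvTechTerms.map (fun t => if PySem.Str.isIn t answer then (1 : Int) else 0)).sum

-- the unified rule table of Source B
def pvRules (word_count : Int) (answer : String) (technical_terms : Int) : List (String × Int × Bool) :=
  [("length", 4, decide (word_count > 50)),
   ("length", 3, decide (word_count > 30)),
   ("length", 2, decide (word_count > 20)),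
   ("length", 1, decide (word_count > 10)),
   ("structure", 3, pvStructureHigh.any (fun p => PySem.Str.isIn p answer)),
   ("structure", 2, pvStructureMid.any (fun p => PySem.Str.isIn p answer)),
   ("structure", 1, pvStructureLow.any (fun p => PySem.Str.isIn p answer)),
   ("depth", 3, decide (technical_terms ≥ 3)),
   ("depth", 2, decide (technical_terms ≥ 2)),
   ("depth", 1, decide (technical_terms ≥ 1))]

def analyze_answer_quality_alt (question : String) (answer : String) : Int × Int :=
  let word_count : Int := ((PySem.Str.split₀ answer).length : Int)
  if pvErrorPhrases.any (fun p => PySem.Str.isIn p answer) then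
    (0, word_count)
  else
    let technical_terms : Int := pvTechCount answer
    let best : PySem.Dict String Int :=
      (pvRules word_count answer technical_terms).foldl
        (fun d r => if r.2.2 then d.insert r.1 (max (d.getD r.1 0) r.2.1) else d)
        PySem.Dict.empty
    (best.values.sum, word_count)

-- ===== PRECONDITION & SPEC =====
def Spec_analyze_answer_quality (question : String) (answer : String) (out : Int × Int) : Prop := out = analyze_answer_quality_alt question answer
instance (question : String) (answer : String) (out : Int × Int) : Decidable (Spec_analyze_answer_quality question answer out) := by unfold Spec_analyze_answer_quality; infer_instance

-- ===== CLAIM (what is proved, stated in full; the proofs are below) =====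
def Claim_equal_analyze_answer_quality : Prop := ∀ (question : String) (answer : String), Dom_analyze_answer_quality question answer → Spec_analyze_answer_quality question answer (analyze_answer_quality question answer)

-- ===== LEMMAS AND PROOFS =====

-- a filter-then-count-ones sum equals the sum of 0/1 indicators
lemma pv_sum_filter_ones (p : String → Bool) (l : List String) :
    ((l.filter p).map (fun _ => (1 : Int))).sum = (l.map (fun t => if p t then (1 : Int) else 0)).sum := by
  induction l with
  | nil => rfl
  | cons x xs ih =>
    simp only [List.filter_cons, List.map_cons, List.sum_cons]
    cases hp : p x
    · simp only [Bool.false_eq_true, if_false]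
      rw [ih]; omega
    · simp only [if_true, List.map_cons, List.sum_cons]
      rw [ih]

-- A's tech sum (count ones over the filtered term list) equals B's pvTechCount
lemma pv_tech_eq (answer : String) :
    (((["function", "method", "class", "object", "variable", "database", "query",
        "algorithm", "interface", "inheritance", "polymorphism", "encapsulation",
        "decorator", "generator", "iterator", "join", "index", "normalization"] : List String).filter
        (fun t => PySem.Str.isIn t answer)).map (fun _ => (1 : Int))).sum
      = pvTechCount answer := by
  unfold pvTechCount pvTechTerms
  exact pv_sum_filter_ones (fun t => PySem.Str.isIn t answer) _

-- the dict fold over the rule table, for any hit booleans: per-category maxima summed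
lemma pv_fold (h4 h3 h2 h1 s3 s2 s1 t3 t2 t1 : Bool) :
    (([("length", (4:Int), h4), ("length", 3, h3), ("length", 2, h2), ("length", 1, h1),
       ("structure", 3, s3), ("structure", 2, s2), ("structure", 1, s1),
       ("depth", 3, t3), ("depth", 2, t2), ("depth", 1, t1)] : List (String × Int × Bool)).foldl
        (fun d r => if r.2.2 then d.insert r.1 (max (d.getD r.1 0) r.2.1) else d)
        PySem.Dict.empty).values.sum
      = (if h4 then 4 else if h3 then 3 else if h2 then 2 else if h1 then 1 else 0)
        + (if s3 then 3 else if s2 then 2 else if s1 then 1 else 0)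
        + (if t3 then 3 else if t2 then 2 else if t1 then 1 else 0) := by
  cases h4 <;> cases h3 <;> cases h2 <;> cases h1 <;> cases s3 <;> cases s2 <;> cases s1 <;>
    cases t3 <;> cases t2 <;> cases t1 <;> decide

set_option maxHeartbeats 1600000 in
theorem analyze_answer_quality_spec : Claim_equal_analyze_answer_quality := by
  intro question answer _
  unfold Spec_analyze_answer_quality
  unfold analyze_answer_quality analyze_answer_quality_alt
  simp only [pvErrorPhrases, pvStructureHigh, pvStructureMid, pvStructureLow, pvRules]
  by_cases he : ((["no response", "could not understand", "error with speech", "microphone error"].any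
      (fun p => PySem.Str.isIn p answer)) = true)
  · rw [if_pos he, if_pos he]
  · rw [if_neg he, if_neg he]
    rw [pv_tech_eq answer, pv_fold]
    refine Prod.ext ?_ rfl
    simp only [decide_eq_true_eq]
    split_ifs <;> omega

-- ===== VERDICT (by name: the statement is the Claim_ definition above) =====
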